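-- pv_equiv track=rewrite | github.com/Parmeshk7/Data-Structures-and-Algorithms | Leetcode/Maximum_Total_Importance_of_Roads.py | maximumImportance
-- ===== SOURCE A (Python) =====
-- from typing import List
--
-- def maximumImportance(n: int, roads: List[List[int]]) -> int:
--     degree = dict()
--     for road in roads:
--         degree[road[0]] = degree.get(road[0], 0) + 1
--         degree[road[1]] = degree.get(road[1], 0) + 1
--
--     values = [0]*n
--     sorted_nodes = sorted(degree.items(), key=lambda x: x[1], reverse=True)
--     val = n
--
--     for pair in sorted_nodes:
--         values[pair[0]] = val
--         val -= 1
--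
--     importance = 0
--     for u, v in roads:
--         importance += values[u] + values[v]
--     return importance
-- ===== SOURCE B (Python) =====
-- def maximumImportance(n, roads):
--     degree = {}
--     for a, b in roads:
--         degree[a] = degree.get(a, 0) + 1
--         degree[b] = degree.get(b, 0) + 1
--     # counting sort by degree: bucket the degree frequencies (a degree is at most 2*len(roads)),
--     # then hand out values n, n-1, ... walking the buckets from the highest degree down.
--     buckets = [0] * (2 * len(roads) + 1)
--     for c in degree.values():
--         buckets[c] += 1
--     total = 0
--     val = n
--     for c in range(len(buckets) - 1, 0, -1):
--         for _ in range(buckets[c]):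
--             total += val * c
--             val -= 1
--     return total
-- ===== Notes on version B (the rewrite author's own statement) =====
-- stated objective: alternative
-- what changed: B replaces A's comparison sort of the degree items, the values array and the second pass over roads by a counting sort: degree frequencies are bucketed by degree (a degree is at most 2*len(roads)), and one walk over the buckets from the highest degree down hands out values n, n-1, ... while accumulating total += val * degree.
-- outside the precondition, e.g. on maximumImportance(1, [[0, -1]]): A returns 0, B returns 1; on maximumImportance(2, [[0, 1, 5]]): A raises ValueError, B raises ValueError; on maximumImportance(1, [[0, 2]]): A raises IndexError, B returns 1
import Mathlib
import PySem

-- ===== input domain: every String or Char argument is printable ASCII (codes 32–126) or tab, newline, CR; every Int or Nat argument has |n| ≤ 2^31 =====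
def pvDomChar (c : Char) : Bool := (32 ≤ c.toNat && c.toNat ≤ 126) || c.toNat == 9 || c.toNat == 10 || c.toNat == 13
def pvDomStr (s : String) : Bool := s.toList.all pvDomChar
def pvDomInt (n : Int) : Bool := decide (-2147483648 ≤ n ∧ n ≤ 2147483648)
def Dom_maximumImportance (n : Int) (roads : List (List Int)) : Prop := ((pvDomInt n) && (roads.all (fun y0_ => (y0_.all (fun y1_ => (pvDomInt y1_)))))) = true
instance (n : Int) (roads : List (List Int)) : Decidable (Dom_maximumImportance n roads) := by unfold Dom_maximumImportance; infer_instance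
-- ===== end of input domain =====

-- B replaces A's comparison sort of the degree items, values array and second pass over roads by a
-- counting sort: degree frequencies are bucketed by degree and one walk over the buckets from the
-- highest degree down hands out values n, n-1, ... while accumulating total += val * degree.

-- ===== PORT A =====
-- body of A's degree-counting loop (road[0] / road[1] via pyGet?; none = IndexError, outside Pre_)
def pvDegStepA (d : PySem.Dict Int Int) (road : List Int) : PySem.Dict Int Int :=
  match PySem.List.pyGet? road 0, PySem.List.pyGet? road 1 with
  | some u, some v =>
    let d1 := d.insert u (d.getD u 0 + 1)
    d1.insert v (d1.getD v 0 + 1)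
  | _, _ => d
-- body of A's 'values[pair[0]] = val; val -= 1' loop (state: values × val)
def pvAssignStep (p : List Int × Int) (pair : Int × Int) : List Int × Int :=
  (PySem.List.pySetD p.1 pair.1 p.2, p.2 - 1)
-- body of A's 'importance += values[u] + values[v]' loop ('for u, v in roads' unpack, outside Pre_ when len ≠ 2)
def pvImpStep (values : List Int) (acc : Int) (road : List Int) : Int :=
  match road with
  | [u, v] => acc + (PySem.List.pyGetD values u 0 + PySem.List.pyGetD values v 0)
  | _ => acc

def maximumImportance (n : Int) (roads : List (List Int)) : Int :=
  let degree := roads.foldl pvDegStepA PySem.Dict.empty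
  let values : List Int := List.replicate n.toNat 0
  let sorted_nodes := PySem.List.sorted degree.items (fun x => x.2) true
  let sv := sorted_nodes.foldl pvAssignStep (values, n)
  roads.foldl (pvImpStep sv.1) 0

-- ===== PORT B =====
-- body of B's degree-counting loop ('for a, b in roads' unpack, outside Pre_ when len ≠ 2)
def pvDegStepB (d : PySem.Dict Int Int) (road : List Int) : PySem.Dict Int Int :=
  match road with
  | [a, b] =>
    let d1 := d.insert a (d.getD a 0 + 1)
    d1.insert b (d1.getD b 0 + 1)
  | _ => d
-- body of B's 'buckets[c] += 1' loop
def pvBucketStep (bs : List Int) (c : Int) : List Int :=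
  PySem.List.pySetD bs c (PySem.List.pyGetD bs c 0 + 1)
-- body of B's 'total += val * c; val -= 1' (state: total × val)
def pvBStep (q : Int × Int) (c : Int) : Int × Int := (q.1 + q.2 * c, q.2 - 1)
-- B's inner 'for _ in range(buckets[c]):' loop
def pvBInner (buckets : List Int) (p : Int × Int) (c : Int) : Int × Int :=
  (PySem.List.pyRange 0 (PySem.List.pyGetD buckets c 0) 1).foldl (fun q _ => pvBStep q c) p

def maximumImportance_alt (n : Int) (roads : List (List Int)) : Int :=
  let degree := roads.foldl pvDegStepB PySem.Dict.empty
  let buckets := degree.values.foldl pvBucketStep (List.replicate (2 * roads.length + 1) 0)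
  let tv := (PySem.List.pyRange ((buckets.length : Int) - 1) 0 (-1)).foldl (pvBInner buckets) (0, n)
  tv.1

-- ===== PRECONDITION & SPEC =====
-- Pre_ excludes inputs where A raises (a road that is not a pair: ValueError; a node outside
-- [-n, n): IndexError) and inputs where two node labels x ≥ 0 and x − n both occur, which Python's
-- negative-index wraparound maps to the same slot of A's values array, so that A's result depends
-- on an accidental overwrite — an artefact of A's array implementation.
def Pre_maximumImportance (n : Int) (roads : List (List Int)) : Prop :=
  (∀ road ∈ roads, road.length = 2 ∧ ∀ x ∈ road, -n ≤ x ∧ x < n) ∧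
  (∀ road ∈ roads, ∀ x ∈ road, 0 ≤ x → ∀ road' ∈ roads, ∀ y ∈ road', y ≠ x - n)
instance (n : Int) (roads : List (List Int)) : Decidable (Pre_maximumImportance n roads) := by
  unfold Pre_maximumImportance; infer_instance
def pvWitness_maximumImportance : Int × List (List Int) := (3, [[0, 1], [1, 2], [0, 2]])
def Spec_maximumImportance (n : Int) (roads : List (List Int)) (out : Int) : Prop := out = maximumImportance_alt n roads
instance (n : Int) (roads : List (List Int)) (out : Int) : Decidable (Spec_maximumImportance n roads out) := by unfold Spec_maximumImportance; infer_instance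

-- ===== CLAIM (what is proved, stated in full; the proofs are below) =====
def Claim_equal_maximumImportance : Prop := ∀ (n : Int) (roads : List (List Int)), Dom_maximumImportance n roads → Pre_maximumImportance n roads → Spec_maximumImportance n roads (maximumImportance n roads)

-- ===== LEMMAS AND PROOFS =====

-- weighted sum of counts with decreasing value (what both loops compute, over item pairs)
def pvWsum : Int → List (Int × Int) → Int
  | _, [] => 0
  | v, item :: rest => v * item.2 + pvWsum (v - 1) rest

-- the same weighted sum over a bare list of counts
def pvWsumC : Int → List Int → Int
  | _, [] => 0
  | v, c :: rest => v * c + pvWsumC (v - 1) rest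

lemma pvWsum_eq_wsumC : ∀ (S : List (Int × Int)) (v : Int),
    pvWsum v S = pvWsumC v (S.map Prod.snd) := by
  intro S
  induction S with
  | nil => intro v; rfl
  | cons p rest ih => intro v; simp only [List.map_cons, pvWsum, pvWsumC, ih]

-- B's count fold computes pvWsumC
lemma pvBFold : ∀ (cs : List Int) (t v : Int),
    cs.foldl pvBStep (t, v) = (t + pvWsumC v cs, v - cs.length) := by
  intro cs
  induction cs with
  | nil => intro t v; simp [pvWsumC]
  | cons c rest ih =>
    intro t v
    simp only [List.foldl_cons, pvBStep, pvWsumC, ih, List.length_cons]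
    have h1 : t + v * c + pvWsumC (v - 1) rest = t + (v * c + pvWsumC (v - 1) rest) := by ring
    have h2 : v - 1 - (rest.length : Int) = v - ((rest.length + 1 : Nat) : Int) := by push_cast; ring
    rw [h1, h2]

-- a fold ignoring the element equals the fold over a replicate
lemma pvInnerFold {α : Type} (c : Int) : ∀ (l : List α) (p : Int × Int),
    l.foldl (fun q _ => pvBStep q c) p = (List.replicate l.length c).foldl pvBStep p := by
  intro l
  induction l with
  | nil => intro p; rfl
  | cons a rest ih => intro p; simp only [List.foldl_cons, List.length_cons, List.replicate_succ, ih]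

lemma pvBInner_eq (buckets : List Int) (p : Int × Int) (c : Int) :
    pvBInner buckets p c
      = (List.replicate (PySem.List.pyGetD buckets c 0).toNat c).foldl pvBStep p := by
  unfold pvBInner
  rw [pvInnerFold, PySem.List.length_pyRange_one]
  simp

-- the outer bucket walk is a fold over the flattened replicate blocks
lemma pvOuterFold (buckets : List Int) : ∀ (cl : List Int) (p : Int × Int),
    cl.foldl (pvBInner buckets) p
      = (cl.flatMap (fun c => List.replicate (PySem.List.pyGetD buckets c 0).toNat c)).foldl pvBStep p := by
  intro cl
  induction cl with
  | nil => intro p; rfl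
  | cons c rest ih =>
    intro p
    simp only [List.foldl_cons, List.flatMap_cons, List.foldl_append, pvBInner_eq, ih]

-- the bucket-filling fold: length preserved, and each in-range slot counts its occurrences
lemma pvBucketFold : ∀ (vals bs : List Int),
    (∀ v ∈ vals, 0 ≤ v ∧ v < (bs.length : Int)) →
    (vals.foldl pvBucketStep bs).length = bs.length ∧
    ∀ x : Int, 0 ≤ x → x < (bs.length : Int) →
      PySem.List.pyGetD (vals.foldl pvBucketStep bs) x 0
        = PySem.List.pyGetD bs x 0 + (vals.count x : Int) := by
  intro vals
  induction vals with
  | nil => intro bs _; exact ⟨rfl, by intro x _ _; simp⟩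
  | cons v rest ih =>
    intro bs h
    obtain ⟨hv0, hvlt⟩ := h v List.mem_cons_self
    have hlt : v.toNat < bs.length := by omega
    have hbs' : (pvBucketStep bs v).length = bs.length := by
      unfold pvBucketStep; rw [PySem.List.length_pySetD]
    obtain ⟨ihlen, ihget⟩ := ih (pvBucketStep bs v) (by
      intro w hw
      have := h w (List.mem_cons_of_mem _ hw)
      rw [hbs']; exact this)
    refine ⟨by simp only [List.foldl_cons]; rw [ihlen, hbs'], ?_⟩
    intro x hx0 hxlt
    simp only [List.foldl_cons]
    rw [ihget x hx0 (by rw [hbs']; exact hxlt)]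
    unfold pvBucketStep
    have hv : v = ((v.toNat : Nat) : Int) := by omega
    have hx : x = ((x.toNat : Nat) : Int) := by omega
    rw [hv, hx, PySem.List.pyGetD_pySetD_natCast _ _ _ _ _ hlt]
    by_cases hxv : x.toNat = v.toNat
    · rw [if_pos hxv]
      have hxveq : ((x.toNat : Nat) : Int) = ((v.toNat : Nat) : Int) := by rw [hxv]
      rw [← hxveq]
      have hc : (((x.toNat : Nat) : Int) :: rest).count ((x.toNat : Nat) : Int)
          = rest.count ((x.toNat : Nat) : Int) + 1 := by
        simp
      rw [hc]
      push_cast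
      ring
    · rw [if_neg hxv]
      have hne : ((x.toNat : Nat) : Int) ≠ ((v.toNat : Nat) : Int) := by omega
      have hc : (((v.toNat : Nat) : Int) :: rest).count ((x.toNat : Nat) : Int)
          = rest.count ((x.toNat : Nat) : Int) := by
        rw [List.count_cons]
        simp only [beq_iff_eq]
        rw [if_neg (Ne.symm hne), Nat.add_zero]
      rw [hc]

-- a replicate-of-zeros array reads 0 everywhere
lemma pvGetReplicateZero (m : Nat) (x : Int) :
    PySem.List.pyGetD (List.replicate m (0 : Int)) x 0 = 0 := by
  unfold PySem.List.pyGetD PySem.List.pyGet? PySem.List.pyIdx?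
  split_ifs <;> simp

-- counting occurrences in the flattened replicate blocks
lemma pvFlatCount (k : Int → Nat) : ∀ (cl : List Int), cl.Nodup → ∀ x : Int,
    (cl.flatMap (fun c => List.replicate (k c) c)).count x = if x ∈ cl then k x else 0 := by
  intro cl
  induction cl with
  | nil => intro _ x; simp
  | cons c rest ih =>
    intro hnd x
    obtain ⟨hcr, hnd'⟩ := List.nodup_cons.mp hnd
    simp only [List.flatMap_cons, List.count_append, ih hnd' x]
    by_cases hxc : x = c
    · subst hxc
      simp [hcr]
    · have hcx : c ≠ x := fun h => hxc h.symm
      have : (List.replicate (k c) c).count x = 0 := by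
        simp [List.count_replicate, hcx]
      simp only [this, Nat.zero_add]
      by_cases hxr : x ∈ rest
      · simp [hxr, List.mem_cons, hxc]
      · simp [hxr, List.mem_cons, hxc]

-- the flattened replicate blocks of a strictly decreasing key list are nonincreasing
lemma pvFlatPairwise (k : Int → Nat) : ∀ (cl : List Int), cl.Pairwise (· > ·) →
    (cl.flatMap (fun c => List.replicate (k c) c)).Pairwise (fun a b => b ≤ a) := by
  intro cl
  induction cl with
  | nil => intro _; simp
  | cons c rest ih =>
    intro hp
    obtain ⟨hhead, htail⟩ := List.pairwise_cons.mp hp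
    simp only [List.flatMap_cons]
    rw [List.pairwise_append]
    refine ⟨List.pairwise_replicate.mpr (Or.inr le_rfl), ih htail, ?_⟩
    intro a ha b hb
    have ha' : a = c := List.eq_of_mem_replicate ha
    obtain ⟨c', hc', hb'⟩ := List.mem_flatMap.mp hb
    have hb'' : b = c' := List.eq_of_mem_replicate hb'
    rw [ha', hb'']
    exact le_of_lt (hhead c' hc')

-- the degree-building folds of both ports equal the insert-counter fold over the flattened roads
lemma pvDegA (roads : List (List Int)) (h : ∀ r ∈ roads, r.length = 2) :
    ∀ d : PySem.Dict Int Int,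
    roads.foldl pvDegStepA d
    = roads.flatten.foldl (fun d x => d.insert x (d.getD x 0 + 1)) d := by
  induction roads with
  | nil => intro d; simp
  | cons r rs ih =>
    intro d
    obtain ⟨u, v, rfl⟩ := List.length_eq_two.mp (h r List.mem_cons_self)
    simp only [List.foldl_cons, List.flatten_cons, List.foldl_append]
    rw [ih (fun r hr => h r (List.mem_cons_of_mem _ hr))]
    simp [pvDegStepA, PySem.List.pyGet?, PySem.List.pyIdx?]

lemma pvDegB (roads : List (List Int)) (h : ∀ r ∈ roads, r.length = 2) :
    ∀ d : PySem.Dict Int Int,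
    roads.foldl pvDegStepB d
    = roads.flatten.foldl (fun d x => d.insert x (d.getD x 0 + 1)) d := by
  induction roads with
  | nil => intro d; simp
  | cons r rs ih =>
    intro d
    obtain ⟨u, v, rfl⟩ := List.length_eq_two.mp (h r List.mem_cons_self)
    simp only [List.foldl_cons, List.flatten_cons, List.foldl_append]
    rw [ih (fun r hr => h r (List.mem_cons_of_mem _ hr))]
    simp [pvDegStepB]

-- flattening length-2 roads doubles the length
lemma pvFlatLen : ∀ (roads : List (List Int)), (∀ r ∈ roads, r.length = 2) →
    roads.flatten.length = 2 * roads.length := by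
  intro roads
  induction roads with
  | nil => intro _; rfl
  | cons r rs ih =>
    intro h
    simp only [List.flatten_cons, List.length_append, List.length_cons]
    rw [h r List.mem_cons_self, ih (fun r hr => h r (List.mem_cons_of_mem _ hr))]
    ring

-- A's importance fold equals the sum of lookups over the flattened roads
lemma pvSumA (VS : List Int) (roads : List (List Int)) (h : ∀ r ∈ roads, r.length = 2) :
    ∀ acc : Int,
    roads.foldl (pvImpStep VS) acc
    = acc + (roads.flatten.map (fun x => PySem.List.pyGetD VS x 0)).sum := by
  induction roads with
  | nil => intro acc; simp
  | cons r rs ih =>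
    intro acc
    obtain ⟨u, v, rfl⟩ := List.length_eq_two.mp (h r List.mem_cons_self)
    simp only [List.foldl_cons, List.flatten_cons, List.map_append, List.sum_append]
    rw [ih (fun r hr => h r (List.mem_cons_of_mem _ hr))]
    simp [pvImpStep]
    ring

-- sum of a pointwise sum splits
lemma pvSumMapAdd (f g : Int → Int) : ∀ u : List Int,
    (u.map (fun k => f k + g k)).sum = (u.map f).sum + (u.map g).sum := by
  intro u
  induction u with
  | nil => simp
  | cons a t ih => simp only [List.map_cons, List.sum_cons, ih]; ring

-- summing an if-single over a nodup list
lemma pvSumIte (g : Int → Int) (x : Int) : ∀ u : List Int, u.Nodup → x ∈ u →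
    (u.map (fun k => if k = x then g k else 0)).sum = g x := by
  intro u
  induction u with
  | nil => intro _ hx; cases hx
  | cons a t ih =>
    intro hnd hx
    simp only [List.map_cons, List.sum_cons]
    by_cases hax : a = x
    · subst hax
      have hna := (List.nodup_cons.mp hnd).1
      have hz : ∀ y ∈ t.map (fun k => if k = a then g k else 0), y = 0 := by
        intro y hy
        obtain ⟨k, hk, rfl⟩ := List.mem_map.mp hy
        have hne : k ≠ a := fun he => hna (he ▸ hk)
        simp [hne]
      rw [if_pos rfl, List.sum_eq_zero hz]
      ring
    · have hxt : x ∈ t := by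
        rcases List.mem_cons.mp hx with h' | h'
        · exact absurd h'.symm hax
        · exact h'
      rw [if_neg hax, ih (List.nodup_cons.mp hnd).2 hxt]
      ring

-- Σ_{x∈E} g x regrouped over the distinct values with multiplicities
lemma pvCountSum (g : Int → Int) : ∀ (E u : List Int), u.Nodup → (∀ x ∈ E, x ∈ u) →
    (u.map (fun k => (E.count k : Int) * g k)).sum = (E.map g).sum := by
  intro E
  induction E with
  | nil => intro u _ _; simp
  | cons e E ih =>
    intro u hnd hmem
    have hpt : ∀ k ∈ u, ((e :: E).count k : Int) * g k
        = (E.count k : Int) * g k + (if k = e then g k else 0) := by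
      intro k _
      by_cases hke : k = e
      · subst hke
        simp only [List.count_cons, beq_self_eq_true, if_true]
        push_cast
        ring
      · have hek : ¬ (e = k) := fun h => hke h.symm
        simp only [List.count_cons, hke, hek, beq_iff_eq, if_false]
        push_cast
        ring
    rw [List.map_congr_left hpt, pvSumMapAdd,
      pvSumIte g e u hnd (hmem e List.mem_cons_self),
      ih u hnd (fun x hx => hmem x (List.mem_cons_of_mem _ hx))]
    simp only [List.map_cons, List.sum_cons]
    ring

-- assignments at other in-range nonnegative keys do not change a lookup
lemma pvUntouched (k : Int) (hk : 0 ≤ k) : ∀ (S : List (Int × Int)) (vs : List Int) (v : Int),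
    (∀ p ∈ S, 0 ≤ p.1 ∧ p.1 < (vs.length : Int) ∧ p.1 ≠ k) →
    PySem.List.pyGetD ((S.foldl pvAssignStep (vs, v)).1) k 0
      = PySem.List.pyGetD vs k 0 := by
  intro S
  induction S with
  | nil => intro vs v _; rfl
  | cons p rest ih =>
    intro vs v h
    obtain ⟨hp0, hplt, hpk⟩ := h p List.mem_cons_self
    have hlt : p.1.toNat < vs.length := by omega
    simp only [List.foldl_cons, pvAssignStep]
    rw [ih _ _ (by
      intro q hq
      have hq' := h q (List.mem_cons_of_mem _ hq)
      simpa [PySem.List.length_pySetD] using hq')]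
    have h1 : p.1 = ((p.1.toNat : Nat) : Int) := by omega
    have h2 : k = ((k.toNat : Nat) : Int) := by omega
    rw [h1, h2, PySem.List.pyGetD_pySetD_natCast _ _ _ _ _ hlt, if_neg (by omega)]

-- the assignment fold realises pvWsum through the weighted lookups
lemma pvAssign : ∀ (S : List (Int × Int)) (vs : List Int) (v : Int),
    (S.map Prod.fst).Nodup → (∀ p ∈ S, 0 ≤ p.1 ∧ p.1 < (vs.length : Int)) →
    (S.map (fun q => q.2 * PySem.List.pyGetD ((S.foldl pvAssignStep (vs, v)).1) q.1 0)).sum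
      = pvWsum v S := by
  intro S
  induction S with
  | nil => intro vs v _ _; simp [pvWsum]
  | cons p rest ih =>
    intro vs v hnd hrange
    obtain ⟨hp0, hpn⟩ := hrange p List.mem_cons_self
    have hlt : p.1.toNat < vs.length := by omega
    simp only [List.foldl_cons, pvAssignStep, List.map_cons, List.sum_cons]
    have hrest : ∀ q ∈ rest, 0 ≤ q.1 ∧ q.1 < ((PySem.List.pySetD vs p.1 v).length : Int) ∧ q.1 ≠ p.1 := by
      intro q hq
      have hr := hrange q (List.mem_cons_of_mem _ hq)
      refine ⟨hr.1, by simpa [PySem.List.length_pySetD] using hr.2, fun he => ?_⟩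
      exact (List.nodup_cons.mp hnd).1 (he ▸ List.mem_map_of_mem hq)
    have h1 : PySem.List.pyGetD ((rest.foldl pvAssignStep (PySem.List.pySetD vs p.1 v, v - 1)).1) p.1 0 = v := by
      rw [pvUntouched p.1 hp0 rest _ _ hrest]
      have he : p.1 = ((p.1.toNat : Nat) : Int) := by omega
      rw [he, PySem.List.pyGetD_pySetD_natCast _ _ _ _ _ hlt, if_pos rfl]
    rw [h1, ih (PySem.List.pySetD vs p.1 v) (v - 1) (List.nodup_cons.mp hnd).2
      (by
        intro q hq
        have hr := hrange q (List.mem_cons_of_mem _ hq)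
        simpa [PySem.List.length_pySetD] using hr)]
    rw [pvWsum]
    ring

-- Python's negative-index wraparound, as index normalisation
def pvNorm (len k : Int) : Int := if k < 0 then k + len else k

lemma pvIdx_norm (len : Nat) (k : Int) (h1 : -(len : Int) ≤ k) (h2 : k < (len : Int)) :
    PySem.List.pyIdx? len k = PySem.List.pyIdx? len (pvNorm len k) := by
  unfold pvNorm PySem.List.pyIdx?
  split_ifs <;> first | rfl | omega | (congr 1; omega)

lemma pvGetD_norm (vs : List Int) (k d : Int) (h1 : -(vs.length : Int) ≤ k)
    (h2 : k < (vs.length : Int)) :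
    PySem.List.pyGetD vs k d = PySem.List.pyGetD vs (pvNorm vs.length k) d := by
  unfold PySem.List.pyGetD PySem.List.pyGet?
  rw [pvIdx_norm vs.length k h1 h2]

lemma pvSetD_norm (vs : List Int) (k v : Int) (h1 : -(vs.length : Int) ≤ k)
    (h2 : k < (vs.length : Int)) :
    PySem.List.pySetD vs k v = PySem.List.pySetD vs (pvNorm vs.length k) v := by
  unfold PySem.List.pySetD PySem.List.pySet?
  rw [pvIdx_norm vs.length k h1 h2]

-- the assignment fold only sees the normalised indices
lemma pvAssignFold_norm : ∀ (S : List (Int × Int)) (vs : List Int) (v : Int),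
    (∀ p ∈ S, -(vs.length : Int) ≤ p.1 ∧ p.1 < (vs.length : Int)) →
    S.foldl pvAssignStep (vs, v)
      = (S.map (fun p => (pvNorm vs.length p.1, p.2))).foldl pvAssignStep (vs, v) := by
  intro S
  induction S with
  | nil => intro vs v _; rfl
  | cons p rest ih =>
    intro vs v h
    obtain ⟨h1, h2⟩ := h p List.mem_cons_self
    simp only [List.map_cons, List.foldl_cons, pvAssignStep]
    rw [← pvSetD_norm vs p.1 v h1 h2]
    rw [ih (PySem.List.pySetD vs p.1 v) (v - 1) (by
      intro q hq
      have := h q (List.mem_cons_of_mem _ hq)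
      simpa [PySem.List.length_pySetD] using this)]
    rw [PySem.List.length_pySetD]

-- the assignment fold preserves the array length
lemma pvFoldLen : ∀ (S : List (Int × Int)) (vs : List Int) (v : Int),
    ((S.foldl pvAssignStep (vs, v)).1).length = vs.length := by
  intro S
  induction S with
  | nil => intro vs v; rfl
  | cons p rest ih =>
    intro vs v
    simp only [List.foldl_cons, pvAssignStep]
    rw [ih, PySem.List.length_pySetD]

-- pvWsum ignores the keys
lemma pvWsum_map (f : Int → Int) : ∀ (S : List (Int × Int)) (v : Int),
    pvWsum v (S.map (fun p => (f p.1, p.2))) = pvWsum v S := by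
  intro S
  induction S with
  | nil => intro v; rfl
  | cons p rest ih => intro v; simp only [List.map_cons, pvWsum, ih]

-- ===== VERDICT (by name: the statement is the Claim_ definition above) =====
theorem maximumImportance_spec : Claim_equal_maximumImportance := by
  intro n roads _ hpre
  unfold Spec_maximumImportance
  simp only [maximumImportance, maximumImportance_alt]
  have hlen : ∀ r ∈ roads, r.length = 2 := fun r hr => (hpre.1 r hr).1
  rw [pvDegA roads hlen, pvDegB roads hlen,
    PySem.Dict.foldl_insert_getD_add_one_eq_counter]
  set E := roads.flatten with hE
  set L := (PySem.Dict.counter E).items with hL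
  set S := PySem.List.sorted L (fun x => x.2) true with hS
  -- membership facts
  have hmemE : ∀ x ∈ E, -n ≤ x ∧ x < n := by
    intro x hx
    obtain ⟨r, hr, hxr⟩ := List.mem_flatten.mp hx
    exact (hpre.1 r hr).2 x hxr
  have hcol : ∀ x ∈ E, 0 ≤ x → ∀ y ∈ E, y ≠ x - n := by
    intro x hx hx0 y hy
    obtain ⟨r, hr, hxr⟩ := List.mem_flatten.mp hx
    obtain ⟨r', hr', hyr⟩ := List.mem_flatten.mp hy
    exact hpre.2 r hr x hxr hx0 r' hr' y hyr
  have hLval : L = (PySem.Set.ofList E).map (fun k => (k, (E.count k : Int))) := by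
    rw [hL, PySem.Dict.items_counter]
  have hperm : S.Perm L := PySem.List.sorted_perm L _ true
  have hkeysL : L.map Prod.fst = PySem.Set.ofList E := by
    rw [hLval, List.map_map]
    simp [Function.comp_def]
  have hndS : (S.map Prod.fst).Nodup := by
    refine ((hperm.map Prod.fst).nodup_iff).mpr ?_
    rw [hkeysL]
    exact PySem.Set.nodup_ofList E
  have hSE : ∀ p ∈ S, p.1 ∈ E := by
    intro p hp
    have hpL : p ∈ L := hperm.mem_iff.mp hp
    have : p.1 ∈ L.map Prod.fst := List.mem_map_of_mem hpL
    rw [hkeysL] at this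
    exact (PySem.Set.mem_ofList E p.1).mp this
  have hmemS : ∀ p ∈ S, -n ≤ p.1 ∧ p.1 < n := fun p hp => hmemE p.1 (hSE p hp)
  -- ===== A's side: reduce to pvWsum n S =====
  rw [pvSumA _ roads hlen 0]
  simp only [zero_add]
  set VS := (S.foldl pvAssignStep (List.replicate n.toNat 0, n)).1 with hVS
  have hVSlen : VS.length = n.toNat := by
    rw [hVS, pvFoldLen, List.length_replicate]
  have hrangeS : ∀ p ∈ S, -((List.replicate n.toNat (0 : Int)).length : Int) ≤ p.1 ∧
      p.1 < ((List.replicate n.toNat (0 : Int)).length : Int) := by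
    intro p hp
    have h := hmemS p hp
    rw [List.length_replicate]
    omega
  set S' := S.map (fun p => (pvNorm n.toNat p.1, p.2)) with hS'
  have hfoldnorm : VS = (S'.foldl pvAssignStep (List.replicate n.toNat 0, n)).1 := by
    rw [hVS, pvAssignFold_norm S _ n hrangeS, List.length_replicate]
  have hndS' : (S'.map Prod.fst).Nodup := by
    have hinj : ∀ x ∈ S.map Prod.fst, ∀ y ∈ S.map Prod.fst,
        pvNorm n.toNat x = pvNorm n.toNat y → x = y := by
      intro x hx y hy hxy
      obtain ⟨p, hp, rfl⟩ := List.mem_map.mp hx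
      obtain ⟨q, hq, rfl⟩ := List.mem_map.mp hy
      have hxE := hSE p hp
      have hyE := hSE q hq
      have hxB := hmemE _ hxE
      have hyB := hmemE _ hyE
      unfold pvNorm at hxy
      by_cases hx0 : p.1 < 0 <;> by_cases hy0 : q.1 < 0
      · omega
      · exact absurd (by omega : p.1 = q.1 - n) (hcol q.1 hyE (by omega) p.1 hxE)
      · exact absurd (by omega : q.1 = p.1 - n) (hcol p.1 hxE (by omega) q.1 hyE)
      · omega
    have : S'.map Prod.fst = (S.map Prod.fst).map (pvNorm n.toNat) := by
      rw [hS', List.map_map, List.map_map]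
      rfl
    rw [this]
    exact List.Nodup.map_on hinj hndS
  have hrangeS' : ∀ p ∈ S', 0 ≤ p.1 ∧ p.1 < ((List.replicate n.toNat (0 : Int)).length : Int) := by
    intro p hp
    obtain ⟨q, hq, rfl⟩ := List.mem_map.mp hp
    have h := hmemS q hq
    rw [List.length_replicate]
    unfold pvNorm
    split_ifs <;> omega
  have step1 : (E.map (fun x => PySem.List.pyGetD VS x 0)).sum
      = ((PySem.Set.ofList E).map (fun k => (E.count k : Int) * PySem.List.pyGetD VS k 0)).sum := by
    rw [pvCountSum (fun x => PySem.List.pyGetD VS x 0) E (PySem.Set.ofList E)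
      (PySem.Set.nodup_ofList E) (fun x hx => (PySem.Set.mem_ofList E x).mpr hx)]
  have step2 : ((PySem.Set.ofList E).map (fun k => (E.count k : Int) * PySem.List.pyGetD VS k 0)).sum
      = (L.map (fun q => q.2 * PySem.List.pyGetD VS q.1 0)).sum := by
    rw [hLval, List.map_map]
    rfl
  have step3 : (L.map (fun q => q.2 * PySem.List.pyGetD VS q.1 0)).sum
      = (S.map (fun q => q.2 * PySem.List.pyGetD VS q.1 0)).sum :=
    ((hperm.map _).sum_eq).symm
  have step3' : (S.map (fun q => q.2 * PySem.List.pyGetD VS q.1 0)).sum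
      = (S'.map (fun q => q.2 * PySem.List.pyGetD VS q.1 0)).sum := by
    rw [hS', List.map_map]
    refine congrArg List.sum (List.map_congr_left ?_)
    intro p hp
    have h := hmemS p hp
    have hb : -((VS.length : Int)) ≤ p.1 ∧ p.1 < (VS.length : Int) := by
      rw [hVSlen]; omega
    simp only [Function.comp_def]
    rw [pvGetD_norm VS p.1 0 hb.1 hb.2, hVSlen]
  have step4 : (S'.map (fun q => q.2 * PySem.List.pyGetD VS q.1 0)).sum = pvWsum n S' := by
    rw [hfoldnorm]
    exact pvAssign S' (List.replicate n.toNat 0) n hndS' hrangeS'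
  have step5 : pvWsum n S' = pvWsum n S := pvWsum_map (pvNorm n.toNat) S n
  rw [step1, step2, step3, step3', step4, step5]
  -- ===== B's side: the bucket walk computes pvWsumC n over the same count sequence =====
  set vals := (PySem.Dict.counter E).values with hvals
  have hvalsL : vals = L.map Prod.snd := by
    rw [hvals, hL]
    rfl
  have hvalsmap : vals = (PySem.Set.ofList E).map (fun k => (E.count k : Int)) := by
    rw [hvalsL, hLval, List.map_map]
    rfl
  have hElen : E.length = 2 * roads.length := pvFlatLen roads hlen
  have hvbound : ∀ v ∈ vals, 1 ≤ v ∧ v ≤ (E.length : Int) := by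
    intro v hv
    rw [hvalsmap] at hv
    obtain ⟨k, hk, rfl⟩ := List.mem_map.mp hv
    have hkE : k ∈ E := (PySem.Set.mem_ofList E k).mp hk
    have h1 : 0 < E.count k := List.count_pos_iff.mpr hkE
    have h2 : E.count k ≤ E.length := List.count_le_length
    omega
  set init := List.replicate (2 * roads.length + 1) (0 : Int) with hinit
  have hinitlen : init.length = 2 * roads.length + 1 := by rw [hinit, List.length_replicate]
  have hvbound' : ∀ v ∈ vals, 0 ≤ v ∧ v < (init.length : Int) := by
    intro v hv
    have := hvbound v hv
    rw [hinitlen]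
    push_cast
    omega
  set buckets := vals.foldl pvBucketStep init with hbuckets
  obtain ⟨hblen, hbget⟩ := pvBucketFold vals init hvbound'
  rw [← hbuckets] at hblen hbget
  have hbget' : ∀ x : Int, 0 ≤ x → x < (init.length : Int) →
      PySem.List.pyGetD buckets x 0 = (vals.count x : Int) := by
    intro x h1 h2
    rw [hbget x h1 h2, hinit, pvGetReplicateZero]
    ring
  set M : Int := (buckets.length : Int) - 1 with hM
  have hMval : M = 2 * (roads.length : Int) := by
    rw [hM, hblen, hinitlen]
    push_cast
    ring
  set cl := PySem.List.pyRange M 0 (-1) with hcl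
  have hclpw : cl.Pairwise (fun a b => b < a) := by
    rw [hcl, PySem.List.pyRange_neg_one_eq_reverse]
    rw [List.pairwise_reverse]
    exact PySem.List.pairwise_lt_pyRange_one _ _
  have hclnd : cl.Nodup := hclpw.imp (fun h => ne_of_gt h)
  have hclmem : ∀ x : Int, x ∈ cl ↔ 0 < x ∧ x ≤ M := by
    intro x
    rw [hcl]
    exact PySem.List.mem_pyRange_neg_one
  -- the walked count sequence
  set bseq := cl.flatMap (fun c => List.replicate (PySem.List.pyGetD buckets c 0).toNat c) with hbseq
  have hBval : ((cl.foldl (pvBInner buckets) ((0 : Int), n)).1) = pvWsumC n bseq := by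
    rw [pvOuterFold buckets cl ((0 : Int), n), ← hbseq, pvBFold]
    simp
  -- count agreement between bseq and vals
  have hcount : ∀ x : Int, bseq.count x = vals.count x := by
    intro x
    rw [hbseq, pvFlatCount _ cl hclnd x]
    by_cases hx : x ∈ cl
    · rw [if_pos hx]
      obtain ⟨hx1, hx2⟩ := (hclmem x).mp hx
      have hxlt : x < (init.length : Int) := by
        rw [hinitlen]; push_cast; rw [hMval] at hx2; omega
      rw [hbget' x (le_of_lt hx1) hxlt]
      simp
    · rw [if_neg hx]
      have hxv : x ∉ vals := by
        intro hxv
        obtain ⟨h1, h2⟩ := hvbound x hxv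
        have : x ∈ cl := (hclmem x).mpr (by
          constructor
          · omega
          · rw [hMval]; have hE2 := hElen; omega)
        exact hx this
      exact (List.count_eq_zero.mpr hxv).symm
  set cnts := S.map Prod.snd with hcnts
  have hpermC : bseq.Perm cnts := by
    have h1 : bseq.Perm vals := List.perm_iff_count.mpr (by
      intro x; exact hcount x)
    have h2 : cnts.Perm vals := by
      rw [hcnts, hvalsL]
      exact hperm.map Prod.snd
    exact h1.trans h2.symm
  -- both are nonincreasing, hence equal
  have hsorted1 : bseq.Pairwise (fun a b => b ≤ a) := by
    rw [hbseq]
    exact pvFlatPairwise _ cl hclpw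
  have hsorted2 : cnts.Pairwise (fun a b => b ≤ a) := by
    rw [hcnts]
    rw [List.pairwise_map]
    exact PySem.List.sorted_pairwise_rev L (fun x => x.2)
  have hEq : bseq = cnts := by
    exact List.Perm.eq_of_pairwise (fun a b _ _ h1 h2 => le_antisymm h2 h1) hsorted1 hsorted2 hpermC
  rw [hBval, hEq, hcnts, ← pvWsum_eq_wsumC]
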